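-- pv_equiv track=rewrite | github.com/EvaZmazek/Chomp-by-Chocolate-monsters | slovar_zmagovalnih_ali_slabih_potez.py | preveri
-- ===== SOURCE A (Python) =====
-- def preveri(seznam):
--     """ta funkcija preveri če je seznam prieren za dodajanje v slovar: torej,
--     če nima treh zaporedno enako velikih stolpcev in če ne obstaja preskok, večji ali enak 3"""
--     sez=seznam+[0]
--     l=len(sez)
--     i=0
--     while i<l-2:
--         if sez[i]==sez[i+1]==sez[i+2] or sez[i]>sez[i+1]+2:
--             return False
--         i+=1
--     if sez[l-2]>sez[l-1]+2: #more še preveriti skok med predzadnjim in zadnjim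
--         return False
--     return True
-- ===== SOURCE B (Python) =====
-- def preveri(seznam):
--     """Two zip-based passes over the zero-padded list: one over adjacent pairs for
--     the big-drop check (covers the final pair too, so no index arithmetic or
--     post-loop tail case), one over adjacent triples for the triple-equal check."""
--     sez = seznam + [0]
--     for a, b in zip(sez, sez[1:]):
--         if a > b + 2:
--             return False
--     for a, b, c in zip(sez, sez[1:], sez[2:]):
--         if a == b == c:
--             return False
--     return True
-- ===== Notes on version B (the rewrite author's own statement) =====
-- stated objective: simpler
-- what changed: Replaced A's single indexed while-loop with its manual index and post-loop special case for the last pair by two separate zip-based passes over the zero-padded list: one over adjacent pairs for the big-drop check (which covers the final pair, removing the tail case) and one over adjacent triples for the triple-equal check.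
import Mathlib
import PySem

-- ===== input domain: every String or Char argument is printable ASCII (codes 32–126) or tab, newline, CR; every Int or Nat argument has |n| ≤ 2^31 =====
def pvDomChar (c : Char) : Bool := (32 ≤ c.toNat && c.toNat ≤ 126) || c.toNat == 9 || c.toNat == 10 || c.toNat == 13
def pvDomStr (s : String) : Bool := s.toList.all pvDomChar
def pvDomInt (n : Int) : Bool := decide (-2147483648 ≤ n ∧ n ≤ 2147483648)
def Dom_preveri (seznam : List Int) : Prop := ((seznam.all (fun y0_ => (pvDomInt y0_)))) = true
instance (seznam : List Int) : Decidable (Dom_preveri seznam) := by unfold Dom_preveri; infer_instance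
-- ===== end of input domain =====

-- B replaces A's single indexed while-loop (plus its post-loop special case for the
-- last pair) by two separate zip-based passes over the zero-padded list: one over adjacent pairs for the
-- big-drop check, one over adjacent triples for the triple-equal check (objective: simpler).

-- ===== PORT A =====
-- the while-loop of A: `while i < l - 2: if sez[i]==sez[i+1]==sez[i+2] or sez[i]>sez[i+1]+2: return False; i += 1`
-- (indices i, i+1, i+2 are always in range there, so pyGetD is exact)
def preveriLoop (sez : List Int) (l i : Int) : Bool :=
  if i < l - 2 then
    if (PySem.List.pyGetD sez i 0 == PySem.List.pyGetD sez (i+1) 0 &&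
        PySem.List.pyGetD sez (i+1) 0 == PySem.List.pyGetD sez (i+2) 0) ||
       PySem.List.pyGetD sez i 0 > PySem.List.pyGetD sez (i+1) 0 + 2
    then false
    else preveriLoop sez l (i+1)
  else true
termination_by (l - i).toNat
decreasing_by omega

def preveri (seznam : List Int) : Bool :=
  let sez : List Int := seznam ++ [0]
  let l : Int := sez.length
  if !preveriLoop sez l 0 then false
  else if PySem.List.pyGetD sez (l-2) 0 > PySem.List.pyGetD sez (l-1) 0 + 2 then false
  else true

-- ===== PORT B =====
def preveri_alt (seznam : List Int) : Bool :=
  let sez : List Int := seznam ++ [0]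
  if (sez.zip (sez.drop 1)).any (fun p => p.1 > p.2 + 2) then false
  else if (sez.zip ((sez.drop 1).zip (sez.drop 2))).any
            (fun t => t.1 == t.2.1 && t.2.1 == t.2.2) then false
  else true

-- ===== PRECONDITION & SPEC =====
def Spec_preveri (seznam : List Int) (out : Bool) : Prop := out = preveri_alt seznam
instance (seznam : List Int) (out : Bool) : Decidable (Spec_preveri seznam out) := by unfold Spec_preveri; infer_instance

-- ===== CLAIM (what is proved, stated in full; the proofs are below) =====
def Claim_equal_preveri : Prop := ∀ (seznam : List Int), Dom_preveri seznam → Spec_preveri seznam (preveri seznam)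

-- ===== LEMMAS AND PROOFS =====

-- proof-side characterisations of the two checks, as structural recursions
def noTrip : List Int → Bool
  | a :: b :: c :: t => if a == b && b == c then false else noTrip (b :: c :: t)
  | _ => true

-- big-drop check on all adjacent pairs EXCEPT the last one (what A's loop covers)
def noDropInit : List Int → Bool
  | a :: b :: c :: t => if a > b + 2 then false else noDropInit (b :: c :: t)
  | _ => true

-- A's post-loop check on the last pair
def finalDrop (sez : List Int) : Bool :=
  PySem.List.pyGetD sez ((sez.length : Int) - 2) 0 >
    PySem.List.pyGetD sez ((sez.length : Int) - 1) 0 + 2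

lemma pyGetD_cons_shift (a : Int) (xs : List Int) (i d : Int) (h : 0 ≤ i) :
    PySem.List.pyGetD (a :: xs) (i + 1) d = PySem.List.pyGetD xs i d := by
  lift i to ℕ using h
  have : ((i : Int) + 1) = ((i + 1 : ℕ) : Int) := by push_cast; ring
  rw [this, PySem.List.pyGetD_natCast, PySem.List.pyGetD_natCast, List.getD_cons_succ]

lemma preveriLoop_shift (a : Int) (xs : List Int) (l i : Int) (h : 0 ≤ i) :
    preveriLoop (a :: xs) (l + 1) (i + 1) = preveriLoop xs l i := by
  conv_lhs => rw [preveriLoop]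
  conv_rhs => rw [preveriLoop]
  have e2 : i + 1 + 2 = (i + 2) + 1 := by ring
  rw [e2, pyGetD_cons_shift a xs i 0 h, pyGetD_cons_shift a xs (i+1) 0 (by omega),
    pyGetD_cons_shift a xs (i+2) 0 (by omega)]
  by_cases hlt : i < l - 2
  · rw [if_pos (by omega : i + 1 < l + 1 - 2), if_pos hlt]
    split
    · rfl
    · exact preveriLoop_shift a xs l (i + 1) (by omega)
  · rw [if_neg (by omega : ¬ (i + 1 < l + 1 - 2)), if_neg hlt]
termination_by (l - i).toNat
decreasing_by omega

lemma preveriLoop_eq (sez : List Int) :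
    preveriLoop sez (sez.length : Int) 0 = (noTrip sez && noDropInit sez) := by
  induction sez with
  | nil => rw [preveriLoop]; simp [noTrip, noDropInit]
  | cons a tl ih =>
    match tl with
    | [] => rw [preveriLoop]; simp [noTrip, noDropInit]
    | [b] => rw [preveriLoop]; simp [noTrip, noDropInit]
    | b :: c :: t =>
      rw [preveriLoop]
      have hlen : ((a :: b :: c :: t).length : Int) = ((b :: c :: t).length : Int) + 1 := by
        push_cast [List.length_cons]; ring
      have h0 : (0:Int) < ((a :: b :: c :: t).length : Int) - 2 := by
        push_cast [List.length_cons]; omega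
      rw [if_pos h0]
      have g0 : PySem.List.pyGetD (a :: b :: c :: t) 0 0 = a := PySem.List.pyGetD_zero_cons _ _ _
      have g1 : PySem.List.pyGetD (a :: b :: c :: t) (0+1) 0 = b := by
        rw [pyGetD_cons_shift a _ 0 0 le_rfl]; exact PySem.List.pyGetD_zero_cons _ _ _
      have g2 : PySem.List.pyGetD (a :: b :: c :: t) (0+2) 0 = c := by
        rw [show (0:Int) + 2 = 1 + 1 from by ring, pyGetD_cons_shift a _ 1 0 (by omega),
          show (1:Int) = 0 + 1 from by ring, pyGetD_cons_shift b _ 0 0 le_rfl]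
        exact PySem.List.pyGetD_zero_cons _ _ _
      rw [g0, g1, g2]
      have hrec : preveriLoop (a :: b :: c :: t) ((a :: b :: c :: t).length : Int) (0 + 1)
          = preveriLoop (b :: c :: t) ((b :: c :: t).length : Int) 0 := by
        rw [hlen]; exact preveriLoop_shift a _ _ 0 le_rfl
      rw [hrec, ih]
      show (if (a == b && b == c) || a > b + 2 then false
              else noTrip (b::c::t) && noDropInit (b::c::t))
          = (noTrip (a::b::c::t) && noDropInit (a::b::c::t))
      simp only [noTrip, noDropInit]
      by_cases h1 : a = b <;> by_cases h2 : b = c <;> by_cases h3 : a > b + 2 <;>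
        simp [h1, h2, h3] <;> ac_rfl

lemma finalDrop_cons (a : Int) (sez : List Int) (h : 2 ≤ sez.length) :
    finalDrop (a :: sez) = finalDrop sez := by
  unfold finalDrop
  have hl : ((a :: sez).length : Int) = (sez.length : Int) + 1 := by
    push_cast [List.length_cons]; ring
  rw [hl,
    show ((sez.length : Int) + 1 - 2) = ((sez.length : Int) - 2) + 1 from by ring,
    show ((sez.length : Int) + 1 - 1) = ((sez.length : Int) - 1) + 1 from by ring,
    pyGetD_cons_shift a sez _ 0 (by omega),
    pyGetD_cons_shift a sez _ 0 (by omega)]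

lemma finalDrop_single (a : Int) : finalDrop [a] = false := by
  unfold finalDrop
  rw [show (((List.length [a] : Nat) : Int) - 2) = -1 from by simp,
    show (((List.length [a] : Nat) : Int) - 1) = 0 from by simp,
    PySem.List.pyGetD_neg_one (xs := [a]) (d := 0) (by simp),
    PySem.List.pyGetD_zero_cons]
  simp

lemma finalDrop_pair (a b : Int) : finalDrop [a, b] = decide (a > b + 2) := by
  unfold finalDrop
  rw [show (((List.length [a, b] : Nat) : Int) - 2) = 0 from by simp,
    show (((List.length [a, b] : Nat) : Int) - 1) = 0 + 1 from by simp,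
    PySem.List.pyGetD_zero_cons, pyGetD_cons_shift a [b] 0 0 le_rfl,
    PySem.List.pyGetD_zero_cons]

lemma pair_pass_eq (sez : List Int) :
    (!(sez.zip (sez.drop 1)).any (fun p => p.1 > p.2 + 2))
      = (noDropInit sez && !finalDrop sez) := by
  induction sez with
  | nil =>
    simp [noDropInit, finalDrop]
    decide
  | cons a tl ih =>
    match tl with
    | [] => simp [noDropInit, finalDrop_single]
    | [b] => simp [noDropInit, finalDrop_pair, List.zip]
    | b :: c :: t =>
      have hstep : ((a :: b :: c :: t).zip ((a :: b :: c :: t).drop 1)).any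
            (fun p => p.1 > p.2 + 2)
          = (decide (a > b + 2) || ((b :: c :: t).zip ((b :: c :: t).drop 1)).any
            (fun p => p.1 > p.2 + 2)) := by
        simp [List.zip]
      rw [hstep, finalDrop_cons a _ (by simp)]
      by_cases h : a > b + 2
      · simp [noDropInit, h]
      · simp only [noDropInit, if_neg h, Bool.not_or, ← ih]
        simp [h]

lemma triple_pass_eq (sez : List Int) :
    (!(sez.zip ((sez.drop 1).zip (sez.drop 2))).any
        (fun t => t.1 == t.2.1 && t.2.1 == t.2.2)) = noTrip sez := by
  induction sez with
  | nil => simp [noTrip]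
  | cons a tl ih =>
    match tl with
    | [] => simp [noTrip]
    | [b] => simp [noTrip]
    | b :: c :: t =>
      have hstep : ((a :: b :: c :: t).zip (((a :: b :: c :: t).drop 1).zip
            ((a :: b :: c :: t).drop 2))).any (fun t => t.1 == t.2.1 && t.2.1 == t.2.2)
          = ((a == b && b == c) || ((b :: c :: t).zip (((b :: c :: t).drop 1).zip
            ((b :: c :: t).drop 2))).any (fun t => t.1 == t.2.1 && t.2.1 == t.2.2)) := by
        simp [List.zip]
      by_cases h1 : a = b
      · by_cases h2 : b = c
        · rw [hstep]; simp [noTrip, h1, h2]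
        · have hA : (a == b && b == c) = false := by simp [h1, h2]
          rw [hstep, hA, Bool.false_or,
            show noTrip (a::b::c::t) = noTrip (b::c::t) from by simp [noTrip, hA]]
          exact ih
      · have hA : (a == b && b == c) = false := by simp [h1]
        rw [hstep, hA, Bool.false_or,
          show noTrip (a::b::c::t) = noTrip (b::c::t) from by simp [noTrip, hA]]
        exact ih

-- ===== VERDICT (by name: the statement is the Claim_ definition above) =====
theorem preveri_spec : Claim_equal_preveri := by
  intro seznam _
  unfold Spec_preveri
  have hp := pair_pass_eq (seznam ++ [0])
  have ht := triple_pass_eq (seznam ++ [0])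
  have hL := preveriLoop_eq (seznam ++ [0])
  have hpa : ((seznam ++ [0]).zip ((seznam ++ [0]).drop 1)).any (fun p => p.1 > p.2 + 2)
      = !(noDropInit (seznam ++ [0]) && !finalDrop (seznam ++ [0])) := by
    rw [← hp, Bool.not_not]
  have hta : ((seznam ++ [0]).zip (((seznam ++ [0]).drop 1).zip ((seznam ++ [0]).drop 2))).any
        (fun t => t.1 == t.2.1 && t.2.1 == t.2.2)
      = !noTrip (seznam ++ [0]) := by
    rw [← ht, Bool.not_not]
  have hfin : (if PySem.List.pyGetD (seznam ++ [0]) (((seznam ++ [0]).length : Int) - 2) 0 >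
        PySem.List.pyGetD (seznam ++ [0]) (((seznam ++ [0]).length : Int) - 1) 0 + 2
      then false else true) = !finalDrop (seznam ++ [0]) := by
    unfold finalDrop
    by_cases h : PySem.List.pyGetD (seznam ++ [0]) (((seznam ++ [0]).length : Int) - 2) 0 >
        PySem.List.pyGetD (seznam ++ [0]) (((seznam ++ [0]).length : Int) - 1) 0 + 2 <;>
      simp [h]
  simp only [preveri, preveri_alt]
  rw [hL, hpa, hta]
  cases hT : noTrip (seznam ++ [0]) <;> cases hD : noDropInit (seznam ++ [0]) <;>
    cases hF : finalDrop (seznam ++ [0]) <;>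
      simp_all
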